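-- pv_equiv track=rewrite | github.com/huyenpham2995/python2sre | time2code/pilingUp/piling_up.py | piling_up
-- ===== SOURCE A (Python) =====
-- def piling_up(block: list):
--     if len(block) < 1:
--         return "Yes"
--
--     base = block[0] if block[0] >= block[-1] else block[-1]
--     while len(block) > 0:
--         if block[0] >= block[-1]:
--             if block[0] > base:
--                 return "No"
--             base = block.pop(0)
--         else:
--             if block[-1] > base:
--                 return "No"
--             base = block.pop(len(block)-1)
--     return "Yes"
-- ===== SOURCE B (Python) =====
-- def piling_up(block: list):
--     if len(block) < 1:
--         return "Yes"
--     c = block[0]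
--     down = True
--     for y in block[1:]:
--         if down:
--             if c >= y:
--                 c = y
--             elif c <= y:
--                 c = y
--                 down = False
--             else:
--                 return "No"
--         else:
--             if c <= y:
--                 c = y
--             else:
--                 return "No"
--     return "Yes"
-- ===== Notes on version B (the rewrite author's own statement) =====
-- stated objective: faster
-- what changed: Replaces A's destructive two-pointer greedy (repeatedly popping the larger end, with pop(0) shifting the whole list) by a single non-mutating forward scan that checks the valley shape: a non-increasing run followed by a non-decreasing run.
import Mathlib
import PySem

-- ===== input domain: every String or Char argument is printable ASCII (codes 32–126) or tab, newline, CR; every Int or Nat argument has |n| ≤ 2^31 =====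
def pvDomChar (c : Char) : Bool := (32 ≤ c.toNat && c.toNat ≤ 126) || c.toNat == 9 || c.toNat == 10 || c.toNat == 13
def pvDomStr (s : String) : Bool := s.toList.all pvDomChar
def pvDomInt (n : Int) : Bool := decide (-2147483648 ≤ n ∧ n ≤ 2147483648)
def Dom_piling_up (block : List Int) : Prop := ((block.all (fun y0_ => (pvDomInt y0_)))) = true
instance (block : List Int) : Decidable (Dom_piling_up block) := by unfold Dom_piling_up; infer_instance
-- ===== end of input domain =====

-- B replaces A's pop-from-both-ends greedy (pop(0) is linear, so A is quadratic on long
-- descents) by one forward scan checking the valley shape; equivalence is about the RETURN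
-- value only: A empties its argument list in place, B does not mutate it.

-- ===== PORT A =====
-- A's while-loop: state = (remaining list, base); block[-1] is t.getLastD x on the
-- nonempty list x::t, block.pop(0) is t, block.pop(len-1) is dropLast.
def pilingLoopA (l : List Int) (base : Int) : String :=
  match l with
  | [] => "Yes"
  | x :: t =>
    let last := t.getLastD x
    if x ≥ last then
      if x > base then "No" else pilingLoopA t x
    else
      if last > base then "No" else pilingLoopA ((x :: t).dropLast) last
termination_by l.length
decreasing_by
  · simp
  · simp [List.length_dropLast]

def piling_up (block : List Int) : String :=
  match block with
  | [] => "Yes"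
  | x :: t =>
    let base := if x ≥ t.getLastD x then x else t.getLastD x
    pilingLoopA (x :: t) base

-- ===== PORT B =====
-- B's for-loop: state = (previous element c, phase flag down), one pass over the tail.
def pilingGoB (c : Int) (down : Bool) (l : List Int) : Bool :=
  match l with
  | [] => true
  | y :: t =>
    if down then
      if c ≥ y then pilingGoB y true t
      else if c ≤ y then pilingGoB y false t
      else false
    else
      if c ≤ y then pilingGoB y false t
      else false

def piling_up_alt (block : List Int) : String :=
  match block with
  | [] => "Yes"
  | x :: t => if pilingGoB x true t then "Yes" else "No"

-- ===== PRECONDITION & SPEC =====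
def Spec_piling_up (block : List Int) (out : String) : Prop := out = piling_up_alt block
instance (block : List Int) (out : String) : Decidable (Spec_piling_up block out) := by unfold Spec_piling_up; infer_instance

-- ===== CLAIM (what is proved, stated in full; the proofs are below) =====
def Claim_equal_piling_up : Prop := ∀ (block : List Int), Dom_piling_up block → Spec_piling_up block (piling_up block)

-- ===== LEMMAS AND PROOFS =====

-- a non-decreasing run is bounded by its last element
lemma goB_up_bound (l : List Int) : ∀ (c : Int), pilingGoB c false l = true →
    ∀ a ∈ c :: l, a ≤ l.getLastD c := by
  induction l with
  | nil => intro c _ a ha; simp at ha; simp [ha]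
  | cons y t ih =>
    intro c h a ha
    simp [pilingGoB] at h
    obtain ⟨hcy, hgo⟩ := h
    have := ih y hgo
    simp only [List.getLastD_cons]
    rcases List.mem_cons.1 ha with rfl | ha'
    · exact le_trans hcy (this y (by simp))
    · exact this a ha'

-- a valley is bounded by the larger of its two ends
lemma goB_down_bound (l : List Int) : ∀ (c : Int), pilingGoB c true l = true →
    ∀ a ∈ c :: l, a ≤ max c (l.getLastD c) := by
  induction l with
  | nil => intro c _ a ha; simp at ha; simp [ha]
  | cons y t ih =>
    intro c h a ha
    simp only [pilingGoB, ge_iff_le] at h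
    by_cases hcy : y ≤ c
    · simp [hcy] at h
      have := ih y h
      simp only [List.getLastD_cons]
      rcases List.mem_cons.1 ha with rfl | ha'
      · exact le_max_left _ _
      · exact le_trans (this a ha') (by simp; omega)
    · have hcy' : c ≤ y := by omega
      simp [hcy, hcy'] at h
      have := goB_up_bound t y h
      simp only [List.getLastD_cons]
      rcases List.mem_cons.1 ha with rfl | ha'
      · exact le_trans hcy' (le_trans (this y (by simp)) (le_max_right _ _))
      · exact le_trans (this a ha') (le_max_right _ _)

-- a prefix of a valley/run is a valley/run
lemma goB_append (l : List Int) : ∀ (c : Int) (ph : Bool) (z : Int),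
    pilingGoB c ph (l ++ [z]) = true → pilingGoB c ph l = true := by
  induction l with
  | nil => intro c ph z _; rfl
  | cons y t ih =>
    intro c ph z h
    cases ph <;> simp only [pilingGoB, List.cons_append, ge_iff_le] at h ⊢ <;>
      split_ifs at h ⊢ <;> exact ih _ _ _ h

-- appending an element ≥ the last keeps a valley/run
lemma goB_append_of (l : List Int) : ∀ (c : Int) (ph : Bool) (z : Int),
    pilingGoB c ph l = true → l.getLastD c ≤ z → pilingGoB c ph (l ++ [z]) = true := by
  induction l with
  | nil =>
    intro c ph z _ hz
    simp only [List.getLastD_nil] at hz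
    cases ph <;> simp [pilingGoB, hz]
  | cons y t ih =>
    intro c ph z h hz
    simp only [List.getLastD_cons] at hz
    cases ph <;> simp only [pilingGoB, List.cons_append, ge_iff_le] at h ⊢ <;>
      split_ifs at h ⊢ <;> exact ih _ _ _ h hz

-- characterization of A's loop by B's scan
lemma loopA_eq (n : Nat) : ∀ (x : Int) (t : List Int) (base : Int), t.length ≤ n →
    pilingLoopA (x :: t) base =
      if max x (t.getLastD x) ≤ base ∧ pilingGoB x true t = true then "Yes" else "No" := by
  induction n with
  | zero =>
    intro x t base hn
    have ht : t = [] := List.length_eq_zero_iff.1 (Nat.le_zero.1 hn)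
    subst ht
    simp only [pilingLoopA, List.getLastD_nil, ge_iff_le, le_refl, if_true, pilingGoB]
    split_ifs <;> simp_all <;> omega
  | succ n ih =>
    intro x t base hn
    match t with
    | [] =>
      simp only [pilingLoopA, List.getLastD_nil, ge_iff_le, le_refl, if_true, pilingGoB]
      split_ifs <;> simp_all <;> try omega
    | y :: t' =>
      have hlen : t'.length ≤ n := by simpa using hn
      by_cases hx : x ≥ t'.getLastD y
      · -- pop from the front
        have hstep : pilingLoopA (x :: y :: t') base =
            if x > base then "No" else pilingLoopA (y :: t') x := by
          rw [pilingLoopA]; simp only [List.getLastD_cons, hx, if_true]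
        rw [hstep, ih y t' x hlen]
        have hiff : pilingGoB x true (y :: t') = true ↔
            (y ≤ x ∧ t'.getLastD y ≤ x ∧ pilingGoB y true t' = true) := by
          constructor
          · intro h
            simp only [pilingGoB, ge_iff_le] at h
            by_cases hxy : y ≤ x
            · simp [hxy] at h; exact ⟨hxy, hx, h⟩
            · exfalso
              have hxy' : x ≤ y := by omega
              simp [hxy, hxy'] at h
              have := goB_up_bound t' y h y (by simp)
              omega
          · rintro ⟨hxy, _, h⟩
            simp [pilingGoB, hxy, h]
        simp only [List.getLastD_cons]
        by_cases hb : x > base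
        · simp only [hb, if_true]
          split_ifs with h2
          · exfalso
            have h2' : max x (t'.getLastD y) ≤ base := h2.1
            have := le_trans (le_max_left x (t'.getLastD y)) h2'
            omega
          · rfl
        · simp only [hb, if_false]
          refine if_congr ?_ rfl rfl
          constructor
          · rintro ⟨hm, hg⟩
            rw [max_le_iff] at hm
            constructor
            · rw [max_le_iff]; omega
            · exact hiff.2 ⟨by omega, by omega, hg⟩
          · rintro ⟨hm, hg⟩
            rcases hiff.1 hg with ⟨h3, h4, h5⟩
            exact ⟨by rw [max_le_iff]; omega, h5⟩
      · -- pop from the back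
        have hlast : (y :: t').getLast (by simp) = t'.getLastD y := by
          simp [List.getLast_eq_getLastD]
        have hdecomp : (y :: t').dropLast ++ [t'.getLastD y] = y :: t' := by
          rw [← hlast]; exact List.dropLast_append_getLast (by simp)
        have hstep : pilingLoopA (x :: y :: t') base =
            if t'.getLastD y > base then "No"
            else pilingLoopA (x :: (y :: t').dropLast) (t'.getLastD y) := by
          rw [pilingLoopA]
          simp only [List.getLastD_cons, hx, if_false, List.dropLast_cons₂]
        have hlen2 : ((y :: t').dropLast).length ≤ n := by
          simpa using hlen
        rw [hstep, ih x ((y :: t').dropLast) (t'.getLastD y) hlen2]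
        have hiff : pilingGoB x true (y :: t') = true ↔
            (((y :: t').dropLast).getLastD x ≤ t'.getLastD y ∧
             pilingGoB x true ((y :: t').dropLast) = true) := by
          constructor
          · intro h
            constructor
            · have hb := goB_down_bound (y :: t') x h
              have hmem : ((y :: t').dropLast).getLastD x ∈ x :: (y :: t').dropLast :=
                List.getLastD_mem_cons
              have hmem' : ((y :: t').dropLast).getLastD x ∈ x :: y :: t' := by
                rcases List.mem_cons.1 hmem with he | he
                · rw [he]; exact List.mem_cons_self
                · have : ((y :: t').dropLast).getLastD x ∈ y :: t' :=
                    List.dropLast_subset _ he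
                  exact List.mem_cons_of_mem _ this
              have := hb _ hmem'
              simp only [List.getLastD_cons] at this
              omega
            · exact goB_append _ _ _ _ (by rw [hdecomp]; exact h)
          · rintro ⟨hle, h⟩
            have := goB_append_of _ _ _ _ h hle
            rwa [hdecomp] at this
        simp only [List.getLastD_cons]
        have hx' : x < t'.getLastD y := by omega
        by_cases hb : t'.getLastD y > base
        · simp only [hb, if_true]
          split_ifs with h2
          · exfalso
            have := le_trans (le_max_right x (t'.getLastD y)) h2.1
            omega
          · rfl
        · simp only [hb, if_false]
          refine if_congr ?_ rfl rfl
          constructor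
          · rintro ⟨hm, hg⟩
            rw [max_le_iff] at hm
            constructor
            · rw [max_le_iff]; omega
            · exact hiff.2 ⟨by omega, hg⟩
          · rintro ⟨hm, hg⟩
            rw [max_le_iff] at hm
            rcases hiff.1 hg with ⟨h3, h4⟩
            exact ⟨by rw [max_le_iff]; omega, h4⟩

-- ===== VERDICT (by name: the statement is the Claim_ definition above) =====
theorem piling_up_spec : Claim_equal_piling_up := by
  intro block _
  unfold Spec_piling_up piling_up piling_up_alt
  match block with
  | [] => rfl
  | x :: t =>
    simp only
    rw [loopA_eq t.length x t _ le_rfl]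
    split_ifs with h1 h2 h2 <;> simp_all <;> omega
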